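-- pv_equiv track=rewrite | github.com/couuas/tricys | tricys/analysis/plot.py | _find_unit_config
-- ===== SOURCE A (Python) =====
-- def _find_unit_config(var_name: str, unit_map: dict) -> dict | None:
--     """Finds the unit configuration for a variable name from the unit_map.
--
--     Uses a three-step matching strategy:
--     1. Checks for an exact match
--     2. Checks if the last part of a dot-separated name matches
--     3. Checks for substring containment (longest keys first)
--
--     Args:
--         var_name: The variable name to look up.
--         unit_map: Dictionary mapping variable names to unit configurations.
--
--     Returns:
--         The unit configuration dict if found, None otherwise.
--
--     Note:
--         Unit config typically contains 'unit' and 'conversion_factor' keys.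
--         Step 3 uses longest-first matching to prefer more specific matches.
--     """
--     if not unit_map or not var_name:
--         return None
--
--     # 1. Exact match
--     if var_name in unit_map:
--         return unit_map[var_name]
--
--     # 2. Last component match (e.g., 'pulse.power' matches 'power')
--     components = var_name.split(".")
--     if len(components) > 1:
--         last_component = components[-1]
--         if last_component in unit_map:
--             return unit_map[last_component]
--
--     # 3. Substring match (longest key first to be safer)
--     for key in sorted(unit_map.keys(), key=len, reverse=True):
--         if key in var_name:
--             return unit_map[key]
--
--     return None
-- ===== SOURCE B (Python) =====
-- def _find_unit_config(var_name: str, unit_map: dict) -> dict | None: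
--     """Same lookup as A: exact match, then last dot-component, then the
--     longest substring-matching key — found by a single linear scan instead
--     of sorting the keys by length."""
--     if not unit_map or not var_name:
--         return None
--
--     if var_name in unit_map:
--         return unit_map[var_name]
--
--     components = var_name.split(".")
--     if len(components) > 1 and components[-1] in unit_map:
--         return unit_map[components[-1]]
--
--     best_key = None
--     best_cfg = None
--     for key, cfg in unit_map.items():
--         if key in var_name and (best_key is None or len(key) > len(best_key)):
--             best_key, best_cfg = key, cfg
--     return best_cfg
-- ===== Notes on version B (the rewrite author's own statement) =====
-- stated objective: alternative
-- what changed: Step 3 no longer sorts the keys by length: a single linear scan over the dict items keeps the longest substring-matching key (strict > preserves the stable-sort tie-break) and its config, so the sort and the final dict lookup disappear.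
import Mathlib
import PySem

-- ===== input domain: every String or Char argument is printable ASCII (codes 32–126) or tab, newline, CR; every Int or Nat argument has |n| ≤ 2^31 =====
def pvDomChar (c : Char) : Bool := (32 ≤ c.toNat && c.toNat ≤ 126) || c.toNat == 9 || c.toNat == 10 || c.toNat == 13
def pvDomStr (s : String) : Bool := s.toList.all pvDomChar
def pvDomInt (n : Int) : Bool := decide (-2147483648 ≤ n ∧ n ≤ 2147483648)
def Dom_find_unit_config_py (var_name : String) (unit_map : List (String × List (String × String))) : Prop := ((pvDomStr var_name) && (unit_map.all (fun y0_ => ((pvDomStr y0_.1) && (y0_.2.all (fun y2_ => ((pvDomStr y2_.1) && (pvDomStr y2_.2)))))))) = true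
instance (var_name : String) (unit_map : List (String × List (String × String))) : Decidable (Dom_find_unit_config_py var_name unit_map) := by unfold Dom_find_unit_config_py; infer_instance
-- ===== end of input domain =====

-- B replaces step 3's sort-by-length + first-match loop with one linear scan keeping the longest matching (key, config) pair (objective: alternative).

-- ===== PORT A =====
def find_unit_config_py (var_name : String) (unit_map : List (String × List (String × String))) : Option (List (String × String)) :=
  if unit_map = [] ∨ var_name = "" then none
  else
    -- 1. exact match: 'var_name in unit_map' then 'unit_map[var_name]'
    match List.lookup var_name unit_map with
    | some v => some v
    | none =>
      let components := (PySem.Str.split? var_name ".").getD []   -- sep "." ≠ "", so split? is some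
      -- 2. last component: components[-1]; getD is unreachable (split? never returns [])
      let step2 :=
        if components.length > 1 then
          List.lookup ((PySem.List.pyGet? components (-1)).getD "") unit_map
        else none
      match step2 with
      | some v => some v
      | none =>
        -- 3. for key in sorted(unit_map.keys(), key=len, reverse=True): if key in var_name: return unit_map[key]
        match (PySem.List.sorted (unit_map.map (·.1)) PySem.Str.len true).find?
                (fun k => PySem.Str.isIn k var_name) with
        | some k => List.lookup k unit_map
        | none => none

-- ===== PORT B =====
-- single scan over the items, keeping the longest substring-matching (key, cfg) pair
def pvAltBest (var_name : String) (unit_map : List (String × List (String × String))) : Option (String × List (String × String)) :=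
  unit_map.foldl (fun best kv =>
    if PySem.Str.isIn kv.1 var_name &&
        (match best with
         | none => true
         | some b => decide (PySem.Str.len b.1 < PySem.Str.len kv.1)) then some kv else best) none

def find_unit_config_py_alt (var_name : String) (unit_map : List (String × List (String × String))) : Option (List (String × String)) :=
  if unit_map = [] ∨ var_name = "" then none
  else
    match List.lookup var_name unit_map with
    | some v => some v
    | none =>
      let components := (PySem.Str.split? var_name ".").getD []
      let last := (PySem.List.pyGet? components (-1)).getD ""
      if components.length > 1 && (List.lookup last unit_map).isSome then
        List.lookup last unit_map
      else
        (pvAltBest var_name unit_map).map (·.2)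

-- ===== PRECONDITION & SPEC =====
def Spec_find_unit_config_py (var_name : String) (unit_map : List (String × List (String × String))) (out : Option (List (String × String))) : Prop := out = find_unit_config_py_alt var_name unit_map
instance (var_name : String) (unit_map : List (String × List (String × String))) (out : Option (List (String × String))) : Decidable (Spec_find_unit_config_py var_name unit_map out) := by unfold Spec_find_unit_config_py; infer_instance

-- ===== CLAIM (what is proved, stated in full; the proofs are below) =====
def Claim_equal_find_unit_config_py : Prop := ∀ (var_name : String) (unit_map : List (String × List (String × String))), Dom_find_unit_config_py var_name unit_map → Spec_find_unit_config_py var_name unit_map (find_unit_config_py var_name unit_map)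

-- ===== LEMMAS AND PROOFS =====

-- the key-level step B's scan performs (decision depends only on the key)
def pvKStep {α : Type} (p : α → Bool) (key : α → Int) (best : Option α) (x : α) : Option α :=
  if p x && (match best with | none => true | some b => decide (key b < key x)) then some x else best

def pvPStep {α β : Type} (p : α → Bool) (key : α → Int) (best : Option (α × β)) (kv : α × β) : Option (α × β) :=
  if p kv.1 && (match best with | none => true | some b => decide (key b.1 < key kv.1)) then some kv else best

lemma pvAltBest_eq (var_name : String) (unit_map : List (String × List (String × String))) :
    pvAltBest var_name unit_map =
      unit_map.foldl (pvPStep (fun k => PySem.Str.isIn k var_name) PySem.Str.len) none := by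
  unfold pvAltBest
  congr 1
  funext best kv
  unfold pvPStep
  exact if_congr (by simp; intro _; cases best <;> rfl) rfl rfl

lemma pvPairwise_insertBy {α : Type} (key : α → Int) (k : α) (acc : List α)
    (h : acc.Pairwise (fun a b => key b ≤ key a)) :
    (PySem.List.insertBy (fun a b => decide (key b < key a)) k acc).Pairwise
      (fun a b => key b ≤ key a) := by
  induction acc with
  | nil => simp [PySem.List.insertBy]
  | cons y ys ih =>
    rcases List.pairwise_cons.mp h with ⟨hy, hys⟩
    by_cases hb : key y < key k
    · simp only [PySem.List.insertBy, decide_eq_true_eq, if_pos hb]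
      refine List.pairwise_cons.mpr ⟨?_, h⟩
      intro z hz
      rcases List.mem_cons.mp hz with rfl | hz
      · omega
      · have := hy z hz; omega
    · simp only [PySem.List.insertBy, decide_eq_true_eq, if_neg hb]
      refine List.pairwise_cons.mpr ⟨?_, ih hys⟩
      intro z hz
      rcases (PySem.List.mem_insertBy _ _ _ _).mp hz with rfl | hz
      · omega
      · exact hy z hz

lemma pvFind?_insertBy {α : Type} (p : α → Bool) (key : α → Int) (k : α) (acc : List α)
    (h : acc.Pairwise (fun a b => key b ≤ key a)) :
    (PySem.List.insertBy (fun a b => decide (key b < key a)) k acc).find? p =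
      pvKStep p key (acc.find? p) k := by
  induction acc with
  | nil =>
    by_cases hp : p k <;> simp [PySem.List.insertBy, pvKStep, hp]
  | cons y ys ih =>
    rcases List.pairwise_cons.mp h with ⟨hy, hys⟩
    by_cases hb : key y < key k
    · simp only [PySem.List.insertBy, decide_eq_true_eq, if_pos hb]
      by_cases hp : p k
      · have hbest : ∀ b, (y :: ys).find? p = some b → key b < key k := by
          intro b hfb
          have hmem : b ∈ y :: ys := List.mem_of_find?_eq_some hfb
          rcases List.mem_cons.mp hmem with rfl | hm
          · exact hb
          · have := hy b hm; omega
        have hL : List.find? p (k :: y :: ys) = some k := by simp [List.find?_cons, hp]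
        rw [hL]
        cases hf : (y :: ys).find? p with
        | none => simp [pvKStep, hp]
        | some b =>
          have := hbest b hf
          simp [pvKStep, hp, this]
      · simp [List.find?_cons, pvKStep, hp]
    · simp only [PySem.List.insertBy, decide_eq_true_eq, if_neg hb]
      by_cases hpy : p y
      · have : ¬ (p k && decide (key y < key k)) = true := by simp [hb]
        simp [List.find?_cons, pvKStep, hpy, hb]
      · simp [List.find?_cons, hpy, ih hys, pvKStep]

lemma pvFoldSort {α : Type} (p : α → Bool) (key : α → Int) (ks : List α) :
    ∀ acc : List α, acc.Pairwise (fun a b => key b ≤ key a) →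
      (ks.foldl (fun a x => PySem.List.insertBy (fun a b => decide (key b < key a)) x a) acc).find? p =
        ks.foldl (pvKStep p key) (acc.find? p) := by
  induction ks with
  | nil => intro acc _; rfl
  | cons k ks ih =>
    intro acc hacc
    simp only [List.foldl_cons]
    rw [ih _ (pvPairwise_insertBy key k acc hacc), pvFind?_insertBy p key k acc hacc]

-- A's step 3 (first match in the stable length-descending sort) is the strict-max scan over the keys
lemma pvSortedFind {α : Type} (p : α → Bool) (key : α → Int) (ks : List α) :
    (PySem.List.sorted ks key true).find? p = ks.foldl (pvKStep p key) none := by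
  rw [PySem.List.sorted_rev_eq_foldl_insertBy]
  simpa using pvFoldSort p key ks [] (by simp)

lemma pvProjFold {α β : Type} (p : α → Bool) (key : α → Int) (m : List (α × β)) :
    ∀ bp : Option (α × β),
      (m.foldl (pvPStep p key) bp).map (·.1) = (m.map (·.1)).foldl (pvKStep p key) (bp.map (·.1)) := by
  induction m with
  | nil => intro bp; rfl
  | cons kv m ih =>
    intro bp
    simp only [List.foldl_cons, List.map_cons]
    rw [ih]
    congr 1
    cases bp with
    | none => by_cases hp : p kv.1 <;> simp [pvPStep, pvKStep, hp]
    | some b =>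
      by_cases hp : p kv.1 <;> by_cases hlt : key b.1 < key kv.1 <;>
        simp [pvPStep, pvKStep, hp, hlt]

lemma pvLookup_append_left {α β : Type} [BEq α] (k : α) (v : β) (l₁ l₂ : List (α × β))
    (h : List.lookup k l₁ = some v) : List.lookup k (l₁ ++ l₂) = some v := by
  induction l₁ with
  | nil => simp [List.lookup] at h
  | cons x l₁ ih =>
    rw [List.cons_append]
    by_cases hk : (k == x.1) = true
    · simp only [List.lookup, hk] at h ⊢; exact h
    · simp only [List.lookup, Bool.not_eq_true] at h ⊢
      rw [Bool.not_eq_true] at hk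
      rw [hk] at h ⊢
      exact ih h

lemma pvLookup_append_none {α β : Type} [BEq α] (k : α) (l₁ l₂ : List (α × β))
    (h : List.lookup k l₁ = none) : List.lookup k (l₁ ++ l₂) = List.lookup k l₂ := by
  induction l₁ with
  | nil => rfl
  | cons x l₁ ih =>
    rw [List.cons_append]
    by_cases hk : (k == x.1) = true
    · simp [List.lookup, hk] at h
    · rw [Bool.not_eq_true] at hk
      simp only [List.lookup, hk] at h ⊢
      exact ih h

lemma pvMem_of_lookup {α β : Type} [BEq α] [LawfulBEq α] (k : α) (v : β) (l : List (α × β))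
    (h : List.lookup k l = some v) : (k, v) ∈ l := by
  induction l with
  | nil => simp [List.lookup] at h
  | cons x l ih =>
    by_cases hk : (k == x.1) = true
    · simp only [List.lookup, hk] at h
      have hkk : k = x.1 := eq_of_beq hk
      obtain ⟨x1, x2⟩ := x
      cases h
      simp_all
    · rw [Bool.not_eq_true] at hk
      simp only [List.lookup, hk] at h
      exact List.mem_cons_of_mem _ (ih h)

-- the winning pair of B's scan is the FIRST item with its key: its cfg is unit_map[key]
lemma pvFoldPairs_lookup {β : Type} (p : String → Bool) (key : String → Int) :
    ∀ (rest processed : List (String × β)) (bp : Option (String × β)),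
      (∀ b : String × β, bp = some b → List.lookup b.1 processed = some b.2) →
      (∀ kv ∈ processed, p kv.1 = true → ∃ b : String × β, bp = some b ∧ key kv.1 ≤ key b.1) →
      ∀ r : String × β, rest.foldl (pvPStep p key) bp = some r →
        List.lookup r.1 (processed ++ rest) = some r.2 := by
  intro rest
  induction rest with
  | nil =>
    intro processed bp h1 _ r hr
    simp only [List.foldl_nil] at hr
    simpa using pvLookup_append_left r.1 r.2 processed [] (h1 r hr)
  | cons kv rest ih =>
    intro processed bp h1 h2 r hr
    simp only [List.foldl_cons] at hr
    have hassoc : processed ++ kv :: rest = (processed ++ [kv]) ++ rest := by simp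
    rw [hassoc]
    have hreject : pvPStep p key bp kv = bp →
        (p kv.1 = true → ∃ b : String × β, bp = some b ∧ key kv.1 ≤ key b.1) →
        List.lookup r.1 ((processed ++ [kv]) ++ rest) = some r.2 := by
      intro hstep hnew
      refine ih (processed ++ [kv]) bp ?_ ?_ r (by rwa [hstep] at hr)
      · intro b hb
        exact pvLookup_append_left b.1 b.2 processed [kv] (h1 b hb)
      · intro kv' hkv' hpk'
        rcases List.mem_append.mp hkv' with hold | hnew'
        · exact h2 kv' hold hpk'
        · simp at hnew'; subst hnew'; exact hnew hpk'
    have hadopt : pvPStep p key bp kv = some kv → p kv.1 = true →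
        (∀ b : String × β, bp = some b → key b.1 < key kv.1) →
        List.lookup r.1 ((processed ++ [kv]) ++ rest) = some r.2 := by
      intro hstep hpk hmax
      have hnotin : List.lookup kv.1 processed = none := by
        cases hl : List.lookup kv.1 processed with
        | none => rfl
        | some v' =>
          exfalso
          rcases h2 (kv.1, v') (pvMem_of_lookup _ _ _ hl) hpk with ⟨b, hbpb, hle⟩
          have hle' : key kv.1 ≤ key b.1 := hle
          have := hmax b hbpb
          omega
      refine ih (processed ++ [kv]) (some kv) ?_ ?_ r (by rwa [hstep] at hr)
      · intro b hb
        cases hb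
        rw [pvLookup_append_none _ _ _ hnotin]
        simp [List.lookup]
      · intro kv' hkv' hpk'
        refine ⟨kv, rfl, ?_⟩
        rcases List.mem_append.mp hkv' with hold | hnew'
        · rcases h2 kv' hold hpk' with ⟨b, hbpb, hle⟩
          have := hmax b hbpb
          omega
        · simp at hnew'; subst hnew'; omega
    cases hbp : bp with
    | none =>
      by_cases hpk : p kv.1 = true
      · exact hadopt (by simp [pvPStep, hbp, hpk]) hpk (by intro b hb; rw [hbp] at hb; cases hb)
      · exact hreject (by simp [pvPStep, hpk]) (fun h => absurd h hpk)
    | some b0 =>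
      by_cases hpk : p kv.1 = true
      · by_cases hlt : key b0.1 < key kv.1
        · exact hadopt (by simp [pvPStep, hbp, hpk, hlt]) hpk
            (by intro b hb; rw [hbp] at hb; cases hb; exact hlt)
        · exact hreject (by simp [pvPStep, hbp, hpk, hlt])
            (by intro _; exact ⟨b0, hbp, by omega⟩)
      · exact hreject (by simp [pvPStep, hpk]) (fun h => absurd h hpk)

-- step-3 equality
lemma pvStep3 (var_name : String) (unit_map : List (String × List (String × String))) :
    (match (PySem.List.sorted (unit_map.map (·.1)) PySem.Str.len true).find?
            (fun k => PySem.Str.isIn k var_name) with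
     | some k => List.lookup k unit_map
     | none => none) =
    (pvAltBest var_name unit_map).map (·.2) := by
  set p : String → Bool := fun k => PySem.Str.isIn k var_name with hp
  have hproj : (unit_map.foldl (pvPStep p PySem.Str.len) none).map (·.1)
      = (unit_map.map (·.1)).foldl (pvKStep p PySem.Str.len) none := by
    simpa using pvProjFold p PySem.Str.len unit_map none
  rw [pvSortedFind p PySem.Str.len (unit_map.map (·.1)), pvAltBest_eq, ← hp, ← hproj]
  cases hfold : unit_map.foldl (pvPStep p PySem.Str.len) none with
  | none => simp
  | some r =>
    have hlk : List.lookup r.1 ([] ++ unit_map) = some r.2 :=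
      pvFoldPairs_lookup p PySem.Str.len unit_map [] none (by simp) (by simp) r hfold
    simp only [List.nil_append] at hlk
    simp [hlk]

-- ===== VERDICT (by name: the statement is the Claim_ definition above) =====
theorem find_unit_config_py_spec : Claim_equal_find_unit_config_py := by
  intro var_name unit_map _
  unfold Spec_find_unit_config_py find_unit_config_py find_unit_config_py_alt
  by_cases h0 : unit_map = [] ∨ var_name = ""
  · simp [h0]
  · simp only [if_neg h0]
    cases hlk : List.lookup var_name unit_map with
    | some v => rfl
    | none =>
      simp only []
      set components := (PySem.Str.split? var_name ".").getD [] with hcomp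
      set last := (PySem.List.pyGet? components (-1)).getD "" with hlast
      by_cases hlen : components.length > 1
      · cases hl2 : List.lookup last unit_map with
        | some v => simp [hlen, hl2]
        | none => simpa [hlen, hl2] using pvStep3 var_name unit_map
      · simpa [hlen] using pvStep3 var_name unit_map
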